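-- pv_equiv track=rewrite | github.com/Nakky123/Python---Algorithms | Section 4/Exam/Q5.py | count_elements_with_prime_factors
-- ===== SOURCE A (Python) =====
-- def sieve_of_eratosthenes(limit):
--     primes = []
--     is_prime = [True] * (limit + 1)
--     is_prime[0] = is_prime[1] = False
--     for p in range(2, int(limit**0.5) + 1):
--         if is_prime[p]:
--             primes.append(p)
--             for i in range(p * p, limit + 1, p):
--                 is_prime[i] = False
--     return primes
--
-- def count_elements_with_prime_factors(S):
--     max_element = max(S)
--     primes = sieve_of_eratosthenes(max_element)
--     count = 0
--     for num in S:
--         prime_factor_count = 0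
--         for prime in primes:
--             if prime > num:
--                 break
--             if num % prime == 0:
--                 prime_factor_count += 1
--         if prime_factor_count > 0 and all(prime % i != 0 for i in range(2, prime)):
--             count += 1
--     return count
-- ===== SOURCE B (Python) =====
-- def count_elements_with_prime_factors(S):
--     m = max(S)
--     # small[n] == 1  iff  n has a divisor d with 2 <= d and d*d <= m
--     # (equivalently: a prime factor p with p*p <= m), so each element is
--     # classified by one O(1) lookup instead of a scan over the prime list.
--     small = bytearray(m + 1)
--     d = 2
--     while d * d <= m:
--         for mult in range(d, m + 1, d):
--             small[mult] = 1
--         d += 1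
--     return sum(1 for num in S if num >= 2 and small[num])
-- ===== Notes on version B (the rewrite author's own statement) =====
-- stated objective: faster
-- what changed: Instead of sieving a prime list and scanning it with trial divisions for every element, B marks every value up to max(S) that has a divisor d with d*d <= max(S) in one sieve-style table, so each element is classified by a single O(1) lookup (no primality bookkeeping is needed, since having a prime factor <= sqrt(max) is equivalent to having any divisor in [2, sqrt(max)]).
-- outside the precondition, e.g. on count_elements_with_prime_factors([]): A raises ValueError, B raises ValueError; on count_elements_with_prime_factors([0, -3]): A raises IndexError, B returns 0
import Mathlib
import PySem

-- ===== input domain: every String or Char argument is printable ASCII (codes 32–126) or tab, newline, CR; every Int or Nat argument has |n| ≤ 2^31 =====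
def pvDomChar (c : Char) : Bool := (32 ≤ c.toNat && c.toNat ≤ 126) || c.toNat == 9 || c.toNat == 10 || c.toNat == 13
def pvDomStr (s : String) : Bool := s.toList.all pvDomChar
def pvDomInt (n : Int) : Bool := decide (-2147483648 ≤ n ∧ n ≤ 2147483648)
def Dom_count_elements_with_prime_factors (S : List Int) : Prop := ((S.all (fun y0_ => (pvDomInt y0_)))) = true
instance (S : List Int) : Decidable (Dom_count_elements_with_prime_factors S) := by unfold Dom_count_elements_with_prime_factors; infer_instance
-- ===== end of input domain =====

-- B replaces per-element scans over a prime list by one O(1) lookup in a divisor-marking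
-- table built with a single sieve-style pass (measured much faster on large inputs).

-- ===== PORT A =====
-- int(limit**0.5) is ported as Nat.sqrt: exact for 0 ≤ limit ≤ 2^31, where the float sqrt
-- is correctly rounded and truncation equals the integer square root.
def sieve_of_eratosthenes (limit : Int) : List Int :=
  let is_prime := PySem.List.pySetD (PySem.List.pySetD (List.replicate (limit + 1).toNat true) 0 false) 1 false
  ((PySem.List.pyRange 2 ((limit.toNat.sqrt : Int) + 1) 1).foldl
    (fun (st : List Int × List Bool) p =>
      if PySem.List.pyGetD st.2 p false then
        (st.1 ++ [p],
         (PySem.List.pyRange (p * p) (limit + 1) p).foldl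
           (fun ip i => PySem.List.pySetD ip i false) st.2)
      else st)
    ([], is_prime)).1

-- the inner 'for prime in primes: … break …' loop: state = (prime_factor_count, last value of
-- the loop variable 'prime', broken?)
def pvBreakFold (num : Int) (primes : List Int) : Int × Option Int × Bool :=
  primes.foldl
    (fun st p =>
      if st.2.2 then st
      else if p > num then (st.1, some p, true)
      else if PySem.Int.mod num p == 0 then (st.1 + 1, some p, false)
      else (st.1, some p, false))
    (0, none, false)

-- 'all(prime % i != 0 for i in range(2, prime))' on the leftover loop variable 'prime';
-- the 'none' branch is Python's NameError, unreachable since it is only read when the count is > 0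
def pvAllCheck (o : Option Int) : Bool :=
  match o with
  | some pr => (PySem.List.pyRange 2 pr 1).all fun i => PySem.Int.mod pr i != 0
  | none => false

def count_elements_with_prime_factors (S : List Int) : Int :=
  let max_element := (PySem.List.max? S (fun x => x)).getD 0  -- max(S); S = [] (ValueError) is outside Pre_
  let primes := sieve_of_eratosthenes max_element
  S.foldl
    (fun count num =>
      let r := pvBreakFold num primes
      let ok := pvAllCheck r.2.1
      if r.1 > 0 && ok then count + 1 else count)
    0

-- ===== PORT B =====
-- 'for mult in range(d, m + 1, d): small[mult] = 1'
def pvMark (m d : Int) (small : List Bool) : List Bool :=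
  (PySem.List.pyRange d (m + 1) d).foldl (fun a i => PySem.List.pySetD a i true) small

-- 'while d * d <= m: … d += 1'
def pvMarkLoop (m d : Int) (small : List Bool) : List Bool :=
  if d * d ≤ m then pvMarkLoop m (d + 1) (pvMark m d small) else small
termination_by (m + 1 - d).toNat
decreasing_by
  have hd : d ≤ d * d := by nlinarith [sq_nonneg d, sq_nonneg (d - 1)]
  omega

def count_elements_with_prime_factors_alt (S : List Int) : Int :=
  let m := (PySem.List.max? S (fun x => x)).getD 0  -- max(S); S = [] is outside Pre_
  let small := pvMarkLoop m 2 (List.replicate (m + 1).toNat false)  -- bytearray(m+1), booleans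
  S.foldl (fun acc num => if decide (2 ≤ num) && PySem.List.pyGetD small num false then acc + 1 else acc) 0

-- ===== PRECONDITION & SPEC =====
-- Pre_ excludes exactly the inputs on which A raises: S = [] (max raises ValueError) and
-- max(S) ≤ 0 (the sieve then raises IndexError on is_prime[0]/is_prime[1]).
def Pre_count_elements_with_prime_factors (S : List Int) : Prop :=
  S ≠ [] ∧ ∃ x ∈ S, 1 ≤ x
instance (S : List Int) : Decidable (Pre_count_elements_with_prime_factors S) := by
  unfold Pre_count_elements_with_prime_factors; infer_instance

def pvWitness_count_elements_with_prime_factors : List Int := [4, 7, -2]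

def Spec_count_elements_with_prime_factors (S : List Int) (out : Int) : Prop :=
  out = count_elements_with_prime_factors_alt S
instance (S : List Int) (out : Int) : Decidable (Spec_count_elements_with_prime_factors S out) := by
  unfold Spec_count_elements_with_prime_factors; infer_instance

-- ===== CLAIM (what is proved, stated in full; the proofs are below) =====
def Claim_equal_count_elements_with_prime_factors : Prop :=
  ∀ (S : List Int), Dom_count_elements_with_prime_factors S →
    Pre_count_elements_with_prime_factors S →
    Spec_count_elements_with_prime_factors S (count_elements_with_prime_factors S)

-- ===== LEMMAS AND PROOFS =====

-- generic: a fold of in-range assignments preserves length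
theorem pv_foldl_set_length (v : Bool) (L : List Int) (arr : List Bool) :
    (L.foldl (fun a i => PySem.List.pySetD a i v) arr).length = arr.length := by
  induction L generalizing arr with
  | nil => rfl
  | cons i L ih => simp [List.foldl_cons, ih, PySem.List.length_pySetD]

-- generic: the result of a fold of in-range assignments of the constant v, pointwise
theorem pv_foldl_set_getD (v : Bool) (L : List Int) (arr : List Bool)
    (h : ∀ i ∈ L, 0 ≤ i ∧ i.toNat < arr.length) (j : Nat) :
    (L.foldl (fun a i => PySem.List.pySetD a i v) arr).getD j false
      = if (j : Int) ∈ L then v else arr.getD j false := by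
  induction L generalizing arr with
  | nil => simp
  | cons i L ih =>
    have hi := h i (by simp)
    rw [List.foldl_cons,
      ih _ (fun x hx => by simpa [PySem.List.length_pySetD] using h x (List.mem_cons_of_mem _ hx)),
      PySem.List.pySetD_of_nonneg _ _ hi.1]
    by_cases hj : (j : Int) ∈ L
    · simp [hj]
    · rw [if_neg hj]
      by_cases hji : (j : Int) = i
      · have hji' : i.toNat = j := by omega
        rw [if_pos (by simp [hji]), List.getD_eq_getElem?_getD, List.getElem?_set,
          if_pos hji', if_pos (hji' ▸ hi.2)]
        rfl
      · have hji' : i.toNat ≠ j := by omega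
        rw [if_neg (by simp [hji, hj]), List.getD_eq_getElem?_getD, List.getElem?_set,
          if_neg hji', ← List.getD_eq_getElem?_getD]

theorem pvMark_length (m d : Int) (small : List Bool) :
    (pvMark m d small).length = small.length := pv_foldl_set_length _ _ _

theorem pvMark_getD (m d : Int) (hd : 2 ≤ d) (small : List Bool)
    (hlen : small.length = (m + 1).toNat) (j : Nat) (hj : j < (m + 1).toNat) :
    (pvMark m d small).getD j false
      = if d ∣ (j : Int) ∧ d ≤ (j : Int) then true else small.getD j false := by
  have hdpos : (0 : Int) < d := by omega
  rw [pvMark, pv_foldl_set_getD _ _ _ (fun i hi => by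
    rcases (PySem.List.mem_pyRange_iff_of_pos hdpos i).1 hi with ⟨h1, h2, _⟩
    constructor <;> omega)]
  have hmem : ((j : Int) ∈ PySem.List.pyRange d (m + 1) d) ↔ (d ∣ (j : Int) ∧ d ≤ (j : Int)) := by
    rw [PySem.List.mem_pyRange_iff_of_pos hdpos]
    constructor
    · rintro ⟨h1, h2, h3⟩
      refine ⟨?_, h1⟩
      have := dvd_add h3 (dvd_refl d)
      simpa using this
    · rintro ⟨h1, h2⟩
      exact ⟨h2, by omega, dvd_sub h1 (dvd_refl d)⟩
  simp only [hmem]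

theorem pvMarkLoop_getD (m d : Int) (small : List Bool) :
    2 ≤ d → small.length = (m + 1).toNat → ∀ j : Nat, j < (m + 1).toNat →
    ((pvMarkLoop m d small).getD j false = true ↔
      (∃ e : Int, d ≤ e ∧ e * e ≤ m ∧ e ∣ (j : Int) ∧ e ≤ (j : Int)) ∨ small.getD j false = true) := by
  induction d, small using pvMarkLoop.induct (m := m) with
  | case1 d small h ih =>
    intro hd hlen j hj
    rw [pvMarkLoop, if_pos h]
    rw [ih (by omega) (by rw [pvMark_length, hlen]) j hj]
    rw [pvMark_getD m d hd small hlen j hj]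
    constructor
    · rintro (⟨e, he1, he2, he3, he4⟩ | hm)
      · exact Or.inl ⟨e, by omega, he2, he3, he4⟩
      · by_cases hc : d ∣ (j : Int) ∧ d ≤ (j : Int)
        · exact Or.inl ⟨d, le_refl d, h, hc.1, hc.2⟩
        · rw [if_neg hc] at hm
          exact Or.inr hm
    · rintro (⟨e, he1, he2, he3, he4⟩ | hm)
      · by_cases hed : e = d
        · subst hed
          exact Or.inr (by rw [if_pos ⟨he3, he4⟩])
        · exact Or.inl ⟨e, by omega, he2, he3, he4⟩
      · refine Or.inr ?_
        split
        · rfl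
        · exact hm
  | case2 d small h =>
    intro hd hlen j hj
    rw [pvMarkLoop, if_neg h]
    constructor
    · exact Or.inr
    · rintro (⟨e, he1, he2, he3, he4⟩ | hm)
      · exfalso
        have : d * d ≤ e * e := by nlinarith
        omega
      · exact hm

theorem pv_alt_cond (m : Int) (h1 : 1 ≤ m) (num : Int) (hle : num ≤ m) :
    ((decide (2 ≤ num) && PySem.List.pyGetD (pvMarkLoop m 2 (List.replicate (m + 1).toNat false)) num false) = true)
      ↔ (2 ≤ num ∧ ∃ e : Int, 2 ≤ e ∧ e * e ≤ m ∧ e ∣ num) := by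
  by_cases h2 : 2 ≤ num
  · rw [Bool.and_eq_true, decide_eq_true_eq]
    have hcast : num = ((num.toNat : Nat) : Int) := by omega
    rw [hcast, PySem.List.pyGetD_natCast]
    rw [pvMarkLoop_getD m 2 _ (le_refl 2) (by simp) num.toNat (by omega)]
    have hrepl : (List.replicate (m + 1).toNat false).getD num.toNat false = false := by
      rw [List.getD_eq_getElem?_getD, List.getElem?_replicate]
      split <;> rfl
    rw [hrepl]
    constructor
    · rintro ⟨_, (⟨e, he1, he2, he3, _⟩ | hfalse)⟩
      · exact ⟨by omega, e, he1, he2, he3⟩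
      · simp at hfalse
    · rintro ⟨_, e, he1, he2, he3⟩
      refine ⟨by omega, Or.inl ⟨e, he1, he2, he3, ?_⟩⟩
      exact Int.le_of_dvd (by omega) he3
  · simp only [Bool.and_eq_true, decide_eq_true_eq]
    constructor
    · rintro ⟨hh, _⟩; exact absurd hh h2
    · rintro ⟨hh, _⟩; exact absurd hh h2

-- j is already struck out after the passes for the outer-loop values 2, …, k-1
def pvCleared (k j : Nat) : Prop := ∃ q : Nat, Nat.Prime q ∧ q < k ∧ q * q ≤ j ∧ q ∣ j

-- invariant of A's outer sieve loop after processing 2, …, k-1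
def pvSieveInv (limit : Int) (k : Nat) (st : List Int × List Bool) : Prop :=
  st.2.length = (limit + 1).toNat ∧
  (∀ p : Int, p ∈ st.1 ↔ 2 ≤ p ∧ p < (k : Int) ∧ Nat.Prime p.toNat) ∧
  st.1.Pairwise (· < ·) ∧
  ∀ j : Nat, j < (limit + 1).toNat →
    (st.2.getD j false = true ↔ (2 ≤ j ∧ ¬ pvCleared k j))

theorem pv_sieve_init (limit : Int) (h : 1 ≤ limit) :
    pvSieveInv limit 2
      ([], PySem.List.pySetD (PySem.List.pySetD (List.replicate (limit + 1).toNat true) 0 false) 1 false) := by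
  have hlen2 : 2 ≤ (limit + 1).toNat := by omega
  refine ⟨?_, ?_, ?_, ?_⟩
  · simp [PySem.List.length_pySetD]
  · intro p
    simp only [List.not_mem_nil, false_iff]
    rintro ⟨h1, h2, _⟩
    omega
  · exact List.Pairwise.nil
  · intro j hj
    rw [PySem.List.pySetD_of_nonneg _ _ (by norm_num), PySem.List.pySetD_of_nonneg _ _ (by norm_num)]
    have h0 : ((0 : Int)).toNat = 0 := rfl
    have h1' : ((1 : Int)).toNat = 1 := rfl
    rw [h0, h1']
    have hnc : ¬ pvCleared 2 j := by
      rintro ⟨q, hq, hqlt, _, _⟩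
      have := hq.two_le
      omega
    rw [List.getD_eq_getElem?_getD, List.getElem?_set, List.getElem?_set, List.getElem?_replicate]
    rcases Nat.lt_or_ge j 2 with hj2 | hj2
    · interval_cases j <;> simp [hnc] <;> split <;> rfl
    · have : (1 : Nat) ≠ j := by omega
      have h0j : (0 : Nat) ≠ j := by omega
      rw [if_neg this, if_neg h0j, if_pos hj]
      simpa using ⟨hj2, hnc⟩

theorem pv_sieve_step (limit : Int) (K : Nat) (st : List Int × List Bool)
    (h2 : 2 ≤ K) (hK : (K : Int) ≤ limit) (hInv : pvSieveInv limit K st) :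
    pvSieveInv limit (K + 1)
      (if PySem.List.pyGetD st.2 (K : Int) false then
         (st.1 ++ [(K : Int)],
          (PySem.List.pyRange ((K : Int) * (K : Int)) (limit + 1) (K : Int)).foldl
            (fun ip i => PySem.List.pySetD ip i false) st.2)
       else st) := by
  obtain ⟨hlen, hmem, hpw, harr⟩ := hInv
  have hKlt : K < (limit + 1).toNat := by omega
  have hread : PySem.List.pyGetD st.2 (K : Int) false = st.2.getD K false :=
    PySem.List.pyGetD_natCast _ _ _
  have hKchar : st.2.getD K false = true ↔ Nat.Prime K := by
    rw [harr K hKlt]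
    constructor
    · rintro ⟨_, hnc⟩
      by_contra hnp
      refine hnc ⟨K.minFac, Nat.minFac_prime (by omega), ?_, ?_, Nat.minFac_dvd K⟩
      · rcases Nat.lt_or_ge K.minFac K with h | h
        · exact h
        · exfalso
          have h1 := Nat.minFac_le (n := K) (by omega)
          have : K.minFac = K := by omega
          exact hnp (this ▸ Nat.minFac_prime (n := K) (by omega))
      · have := Nat.minFac_sq_le_self (n := K) (by omega) hnp
        nlinarith [this]
    · intro hp
      refine ⟨h2, ?_⟩
      rintro ⟨q, hq, hqlt, hqsq, hqdvd⟩
      rcases hp.eq_one_or_self_of_dvd q hqdvd with h | h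
      · exact absurd h (by have := hq.two_le; omega)
      · omega
  have hclear_succ : ∀ j : Nat, Nat.Prime K →
      (pvCleared (K + 1) j ↔ pvCleared K j ∨ (K * K ≤ j ∧ K ∣ j)) := by
    intro j hp
    constructor
    · rintro ⟨q, hq, hqlt, hqsq, hqdvd⟩
      rcases Nat.lt_or_ge q K with h | h
      · exact Or.inl ⟨q, hq, h, hqsq, hqdvd⟩
      · have : q = K := by omega
        subst this
        exact Or.inr ⟨hqsq, hqdvd⟩
    · rintro (⟨q, hq, hqlt, hqsq, hqdvd⟩ | ⟨h1', h2'⟩)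
      · exact ⟨q, hq, by omega, hqsq, hqdvd⟩
      · exact ⟨K, hp, by omega, h1', h2'⟩
  by_cases hKp : st.2.getD K false = true
  · -- K is prime: append K and strike multiples of K from K*K on
    have hp : Nat.Prime K := hKchar.1 hKp
    rw [hread, hKp, if_pos rfl]
    have hKpos : (0 : Int) < (K : Int) := by omega
    have hidx : ∀ i ∈ PySem.List.pyRange ((K : Int) * (K : Int)) (limit + 1) (K : Int),
        0 ≤ i ∧ i.toNat < st.2.length := by
      intro i hi
      rcases (PySem.List.mem_pyRange_iff_of_pos hKpos i).1 hi with ⟨ha, hb, _⟩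
      constructor <;> [nlinarith; (rw [hlen]; omega)]
    refine ⟨?_, ?_, ?_, ?_⟩
    · rw [pv_foldl_set_length, hlen]
    · intro p
      simp only [List.mem_append, List.mem_singleton, hmem p]
      constructor
      · rintro (⟨hp1, hp2, hp3⟩ | hpK)
        · exact ⟨hp1, by omega, hp3⟩
        · subst hpK
          exact ⟨by omega, by omega, by simpa using hp⟩
      · rintro ⟨hp1, hp2, hp3⟩
        rcases lt_or_ge p (K : Int) with h | h
        · exact Or.inl ⟨hp1, h, hp3⟩
        · have : p = (K : Int) := by omega
          exact Or.inr this
    · rw [List.pairwise_append]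
      refine ⟨hpw, List.pairwise_singleton _ _, ?_⟩
      intro a ha b hb
      rw [List.mem_singleton] at hb
      subst hb
      exact ((hmem a).1 ha).2.1
    · intro j hj
      rw [pv_foldl_set_getD _ _ _ hidx j]
      have hmemrange : ((j : Int) ∈ PySem.List.pyRange ((K : Int) * (K : Int)) (limit + 1) (K : Int))
          ↔ (K * K ≤ j ∧ K ∣ j) := by
        rw [PySem.List.mem_pyRange_iff_of_pos hKpos]
        constructor
        · rintro ⟨ha, hb, hc⟩
          have hdvd : (K : Int) ∣ (j : Int) := by
            have := dvd_add hc (Dvd.intro (K : Int) rfl)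
            simpa using this
          refine ⟨by exact_mod_cast ha, ?_⟩
          exact_mod_cast hdvd
        · rintro ⟨ha, hb⟩
          refine ⟨by exact_mod_cast ha, by omega, ?_⟩
          exact dvd_sub (by exact_mod_cast hb) (Dvd.intro (K : Int) rfl)
      by_cases hjr : (j : Int) ∈ PySem.List.pyRange ((K : Int) * (K : Int)) (limit + 1) (K : Int)
      · rw [if_pos hjr]
        have hcl : pvCleared (K + 1) j := by
          rw [hclear_succ j hp]
          exact Or.inr (hmemrange.1 hjr)
        simp [hcl]
      · rw [if_neg hjr, harr j hj, hclear_succ j hp]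
        have : ¬(K * K ≤ j ∧ K ∣ j) := fun hc => hjr (hmemrange.2 hc)
        tauto
  · -- K is not prime: state unchanged
    rw [hread, if_neg (by simpa using hKp)]
    have hnp : ¬ Nat.Prime K := fun hp => hKp (hKchar.2 hp)
    refine ⟨hlen, ?_, hpw, ?_⟩
    · intro p
      rw [hmem p]
      constructor
      · rintro ⟨hp1, hp2, hp3⟩
        exact ⟨hp1, by omega, hp3⟩
      · rintro ⟨hp1, hp2, hp3⟩
        refine ⟨hp1, ?_, hp3⟩
        rcases lt_or_ge p (K : Int) with h | h
        · exact h
        · exfalso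
          have : p = (K : Int) := by omega
          subst this
          exact hnp (by simpa using hp3)
    · intro j hj
      rw [harr j hj]
      have : pvCleared (K + 1) j ↔ pvCleared K j := by
        constructor
        · rintro ⟨q, hq, hqlt, hqsq, hqdvd⟩
          rcases Nat.lt_or_ge q K with h | h
          · exact ⟨q, hq, h, hqsq, hqdvd⟩
          · have : q = K := by omega
            subst this
            exact absurd hq hnp
        · rintro ⟨q, hq, hqlt, hqsq, hqdvd⟩
          exact ⟨q, hq, by omega, hqsq, hqdvd⟩
      rw [this]

theorem pv_sieve_fold (limit : Int) (h1 : 1 ≤ limit) (n : Nat)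
    (hn : (2 + (n : Int)) ≤ limit + 1) :
    pvSieveInv limit (2 + n)
      ((PySem.List.pyRange 2 (2 + (n : Int)) 1).foldl
        (fun (st : List Int × List Bool) p =>
          if PySem.List.pyGetD st.2 p false then
            (st.1 ++ [p],
             (PySem.List.pyRange (p * p) (limit + 1) p).foldl
               (fun ip i => PySem.List.pySetD ip i false) st.2)
          else st)
        ([], PySem.List.pySetD (PySem.List.pySetD (List.replicate (limit + 1).toNat true) 0 false) 1 false)) := by
  induction n with
  | zero =>
    rw [show ((2 : Int) + (0 : Nat)) = 2 by norm_num, PySem.List.pyRange_one_eq_nil (le_refl 2)]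
    exact pv_sieve_init limit h1
  | succ n ih =>
    have hle : (2 : Int) ≤ 2 + (n : Int) := by omega
    have heq : (2 + ((n + 1 : Nat) : Int)) = (2 + (n : Int)) + 1 := by push_cast; ring
    rw [heq, PySem.List.pyRange_one_succ_right hle, List.foldl_append, List.foldl_cons, List.foldl_nil]
    have hcast : ((2 + n : Nat) : Int) = 2 + (n : Int) := by push_cast; ring
    have hstep := pv_sieve_step limit (2 + n) _ (by omega) (by omega)
      (ih (by push_cast at hn ⊢; omega))
    rw [hcast] at hstep
    exact hstep

theorem pv_sieve_spec (limit : Int) (h1 : 1 ≤ limit) :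
    (∀ p : Int, p ∈ sieve_of_eratosthenes limit ↔
        2 ≤ p ∧ p * p ≤ limit ∧ Nat.Prime p.toNat) ∧
    (sieve_of_eratosthenes limit).Pairwise (· < ·) := by
  have hs1 : 1 ≤ limit.toNat.sqrt := by
    have : 1 * 1 ≤ limit.toNat := by omega
    exact Nat.le_sqrt.2 this
  have hsle : limit.toNat.sqrt ≤ limit.toNat := Nat.sqrt_le_self _
  set n := limit.toNat.sqrt - 1 with hn
  have hcast : ((limit.toNat.sqrt : Int) + 1) = 2 + (n : Int) := by
    have : limit.toNat.sqrt = n + 1 := by omega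
    rw [this]; push_cast; ring
  have hfold := pv_sieve_fold limit h1 n (by omega)
  obtain ⟨_, hmem, hpw, _⟩ := hfold
  constructor
  · intro p
    rw [show sieve_of_eratosthenes limit =
        ((PySem.List.pyRange 2 (2 + (n : Int)) 1).foldl
          (fun (st : List Int × List Bool) p =>
            if PySem.List.pyGetD st.2 p false then
              (st.1 ++ [p],
               (PySem.List.pyRange (p * p) (limit + 1) p).foldl
                 (fun ip i => PySem.List.pySetD ip i false) st.2)
            else st)
          ([], PySem.List.pySetD (PySem.List.pySetD (List.replicate (limit + 1).toNat true) 0 false) 1 false)).1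
      from by rw [sieve_of_eratosthenes, ← hcast]]
    rw [hmem p]
    constructor
    · rintro ⟨hp1, hp2, hp3⟩
      refine ⟨hp1, ?_, hp3⟩
      have hple : p.toNat ≤ limit.toNat.sqrt := by push_cast at hp2; omega
      have := Nat.le_sqrt.1 hple
      have hcast2 : ((p.toNat * p.toNat : Nat) : Int) = p * p := by
        push_cast
        rw [Int.toNat_of_nonneg (by omega)]
      omega
    · rintro ⟨hp1, hp2, hp3⟩
      refine ⟨hp1, ?_, hp3⟩
      have hple : p.toNat * p.toNat ≤ limit.toNat := by
        have hcast2 : ((p.toNat * p.toNat : Nat) : Int) = p * p := by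
          push_cast
          rw [Int.toNat_of_nonneg (by omega)]
        omega
      have := Nat.le_sqrt.2 hple
      push_cast
      omega
  · rw [show sieve_of_eratosthenes limit =
        ((PySem.List.pyRange 2 (2 + (n : Int)) 1).foldl
          (fun (st : List Int × List Bool) p =>
            if PySem.List.pyGetD st.2 p false then
              (st.1 ++ [p],
               (PySem.List.pyRange (p * p) (limit + 1) p).foldl
                 (fun ip i => PySem.List.pySetD ip i false) st.2)
            else st)
          ([], PySem.List.pySetD (PySem.List.pySetD (List.replicate (limit + 1).toNat true) 0 false) 1 false)).1
      from by rw [sieve_of_eratosthenes, ← hcast]]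
    exact hpw

theorem pv_breakFold_stop (num : Int) (ps : List Int) (c : Int) (l : Option Int) :
    ps.foldl
      (fun st p =>
        if st.2.2 then st
        else if p > num then (st.1, some p, true)
        else if PySem.Int.mod num p == 0 then (st.1 + 1, some p, false)
        else (st.1, some p, false))
      (c, l, true) = (c, l, true) := by
  induction ps with
  | nil => rfl
  | cons p ps ih => simpa using ih

theorem pv_breakFold_aux (num : Int) (ps : List Int) (hs : ps.Pairwise (· < ·))
    (c : Int) (l : Option Int) :
    (c ≤ (ps.foldl
        (fun st p =>
          if st.2.2 then st
          else if p > num then (st.1, some p, true)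
          else if PySem.Int.mod num p == 0 then (st.1 + 1, some p, false)
          else (st.1, some p, false))
        (c, l, false)).1) ∧
    ((c < (ps.foldl
        (fun st p =>
          if st.2.2 then st
          else if p > num then (st.1, some p, true)
          else if PySem.Int.mod num p == 0 then (st.1 + 1, some p, false)
          else (st.1, some p, false))
        (c, l, false)).1) ↔ ∃ p ∈ ps, p ≤ num ∧ PySem.Int.mod num p = 0) ∧
    (ps ≠ [] → ∃ pr ∈ ps, (ps.foldl
        (fun st p =>
          if st.2.2 then st
          else if p > num then (st.1, some p, true)
          else if PySem.Int.mod num p == 0 then (st.1 + 1, some p, false)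
          else (st.1, some p, false))
        (c, l, false)).2.1 = some pr) := by
  induction ps generalizing c l with
  | nil =>
    refine ⟨le_refl c, ?_, fun h => absurd rfl h⟩
    simp
  | cons p tl ih =>
    have hp := (List.pairwise_cons.1 hs).1
    have htl := (List.pairwise_cons.1 hs).2
    rw [List.foldl_cons]
    by_cases hgt : p > num
    · simp only [if_neg (Bool.false_ne_true), if_pos hgt]
      rw [pv_breakFold_stop]
      refine ⟨le_refl c, ?_, fun _ => ⟨p, by simp⟩⟩
      simp only [lt_self_iff_false, false_iff]
      rintro ⟨q, hq, hq1, hq2⟩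
      rcases List.mem_cons.1 hq with h | h
      · subst h; omega
      · have := hp q h; omega
    · by_cases hdvd : (PySem.Int.mod num p == 0) = true
      · simp only [if_neg (Bool.false_ne_true), if_neg hgt, if_pos hdvd]
        obtain ⟨ih1, ih2, ih3⟩ := ih htl (c + 1) (some p)
        refine ⟨by omega, ?_, ?_⟩
        · constructor
          · intro _
            exact ⟨p, by simp, by omega, beq_iff_eq.1 hdvd⟩
          · intro _
            omega
        · intro _
          rcases eq_or_ne tl [] with htl0 | htl0
          · subst htl0
            exact ⟨p, by simp⟩
          · obtain ⟨pr, hpr, hpr2⟩ := ih3 htl0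
            exact ⟨pr, List.mem_cons_of_mem _ hpr, hpr2⟩
      · simp only [if_neg (Bool.false_ne_true), if_neg hgt, if_neg hdvd]
        obtain ⟨ih1, ih2, ih3⟩ := ih htl c (some p)
        refine ⟨ih1, ?_, ?_⟩
        · rw [ih2]
          constructor
          · rintro ⟨q, hq, hq1, hq2⟩
            exact ⟨q, List.mem_cons_of_mem _ hq, hq1, hq2⟩
          · rintro ⟨q, hq, hq1, hq2⟩
            rcases List.mem_cons.1 hq with h | h
            · subst h; exact absurd (beq_iff_eq.2 hq2) hdvd
            · exact ⟨q, h, hq1, hq2⟩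
        · intro _
          rcases eq_or_ne tl [] with htl0 | htl0
          · subst htl0
            exact ⟨p, by simp⟩
          · obtain ⟨pr, hpr, hpr2⟩ := ih3 htl0
            exact ⟨pr, List.mem_cons_of_mem _ hpr, hpr2⟩


theorem pv_allCheck (pr : Int) (h2 : 2 ≤ pr) (hp : Nat.Prime pr.toNat) :
    ((PySem.List.pyRange 2 pr 1).all fun i => PySem.Int.mod pr i != 0) = true := by
  rw [List.all_eq_true]
  intro i hi
  rcases (PySem.List.mem_pyRange_one).1 hi with ⟨hi1, hi2⟩
  rw [bne_iff_ne, Ne, PySem.Int.mod_eq_zero_iff_dvd]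
  intro hdvd
  have hnat : i.toNat ∣ pr.toNat := by
    have h0 : (i.toNat : Int) = i := Int.toNat_of_nonneg (by omega)
    have h1 : (pr.toNat : Int) = pr := Int.toNat_of_nonneg (by omega)
    rw [← Int.natCast_dvd_natCast, h0, h1]
    exact hdvd
  rcases hp.eq_one_or_self_of_dvd _ hnat with h | h <;> omega

-- A's per-element condition, characterized
theorem pv_A_cond (m num : Int) (h1 : 1 ≤ m) :
    ((decide ((pvBreakFold num (sieve_of_eratosthenes m)).1 > 0) &&
      pvAllCheck (pvBreakFold num (sieve_of_eratosthenes m)).2.1) = true)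
      ↔ (2 ≤ num ∧ ∃ e : Int, 2 ≤ e ∧ e * e ≤ m ∧ e ∣ num) := by
  obtain ⟨hmem, hpw⟩ := pv_sieve_spec m h1
  obtain ⟨haux1, haux2, haux3⟩ := pv_breakFold_aux num (sieve_of_eratosthenes m) hpw 0 none
  constructor
  · rw [Bool.and_eq_true, decide_eq_true_eq]
    rintro ⟨hpos, hok⟩
    obtain ⟨p, hpmem, hple, hpmod⟩ := haux2.1 hpos
    have hp := (hmem p).1 hpmem
    exact ⟨by omega, p, hp.1, hp.2.1, (PySem.Int.mod_eq_zero_iff_dvd num p).1 hpmod⟩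
  · rintro ⟨h2, e, he1, he2, he3⟩
    set q := ((e.toNat.minFac : Nat) : Int) with hq
    have he2' : e.toNat ≠ 1 := by omega
    have hqp : Nat.Prime e.toNat.minFac := Nat.minFac_prime he2'
    have hq2 : 2 ≤ q := by
      have := hqp.two_le
      omega
    have hqle : q ≤ e := by
      have h' : e.toNat.minFac ≤ e.toNat := Nat.minFac_le (by omega)
      omega
    have hqdvd_e : q ∣ e := by
      have h' : ((e.toNat.minFac : Nat) : Int) ∣ ((e.toNat : Nat) : Int) :=
        Int.natCast_dvd_natCast.2 (Nat.minFac_dvd _)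
      rwa [Int.toNat_of_nonneg (by omega : (0:Int) ≤ e)] at h'
    have hqdvd : q ∣ num := hqdvd_e.trans he3
    have hqsq : q * q ≤ m := by nlinarith
    have hqprime : Nat.Prime q.toNat := by rw [hq, Int.toNat_natCast]; exact hqp
    have hqmem : q ∈ sieve_of_eratosthenes m := (hmem q).2 ⟨hq2, hqsq, hqprime⟩
    have hqlenum : q ≤ num := Int.le_of_dvd (by omega) hqdvd
    have hpos : 0 < (pvBreakFold num (sieve_of_eratosthenes m)).1 :=
      haux2.2 ⟨q, hqmem, hqlenum, (PySem.Int.mod_eq_zero_iff_dvd num q).2 hqdvd⟩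
    have hne : sieve_of_eratosthenes m ≠ [] := by
      intro h0
      rw [h0] at hqmem
      simp at hqmem
    obtain ⟨pr, hprmem, hpr⟩ := haux3 hne
    rw [Bool.and_eq_true, decide_eq_true_eq]
    refine ⟨hpos, ?_⟩
    have hpr' : (pvBreakFold num (sieve_of_eratosthenes m)).2.1 = some pr := hpr
    rw [hpr']
    have hprp := (hmem pr).1 hprmem
    unfold pvAllCheck
    exact pv_allCheck pr hprp.1 hprp.2.2

-- ===== VERDICT (by name: the statement is the Claim_ definition above) =====
theorem count_elements_with_prime_factors_spec : Claim_equal_count_elements_with_prime_factors := by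
  intro S hDom hPre
  obtain ⟨hne, x, hx, hx1⟩ := hPre
  unfold Spec_count_elements_with_prime_factors
  obtain ⟨mx, hmx⟩ : ∃ mx, PySem.List.max? S (fun x => x) = some mx := by
    cases h : PySem.List.max? S (fun x => x) with
    | none => exact absurd ((PySem.List.max?_eq_none_iff S _).1 h) hne
    | some mx => exact ⟨mx, rfl⟩
  have hmax := PySem.List.max?_isMax hmx
  have hm1 : (1 : Int) ≤ mx := le_trans hx1 (hmax x hx)
  unfold count_elements_with_prime_factors count_elements_with_prime_factors_alt
  rw [hmx]
  simp only [Option.getD_some]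
  apply PySem.List.foldl_congr_mem
  intro acc num hnum
  have hle : num ≤ mx := hmax num hnum
  have hA := pv_A_cond mx num hm1
  have hB := pv_alt_cond mx hm1 num hle
  exact if_congr (hA.trans hB.symm) rfl rfl
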